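-- pv_equiv track=rewrite | github.com/agilebydesign/agile_bots | src/scanners/domain_scanner_base.py | _find_domain_concepts_in_columns
-- ===== SOURCE A (Python) =====
-- from typing import List, Dict, Any, Optional, Set, TYPE_CHECKING
--
-- def _find_domain_concepts_in_columns(
--
--     columns: List[str],
--     domain_concepts: List[Dict[str, Any]]
-- ) -> Set[str]:
--     """Find which domain concepts are represented in example columns."""
--     found = set()
--
--     concept_names = [c.get('name', '').lower() for c in domain_concepts if c.get('name')]
--
--     for column in columns:
--         column_lower = column.lower()
--         column_parts = column_lower.split('_')
--
--         for concept_name in concept_names: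
--             # Check if concept name is in column
--             if concept_name in column_lower:
--                 found.add(concept_name)
--             # Check column parts
--             for part in column_parts:
--                 if part == concept_name or part == concept_name + 's':
--                     found.add(concept_name)
--
--     return found
-- ===== SOURCE B (Python) =====
-- def _find_domain_concepts_in_columns(columns, domain_concepts):
--     """Find which domain concepts are represented in example columns.
--
--     Instead of scanning every column for every concept name, index each column
--     once: collect the set of its substrings of the needed lengths and the set
--     of its '_'-parts, then keep the names found in those indexes.
--     """
--     names = [c.get('name', '').lower() for c in domain_concepts if c.get('name')]
--     lengths = {len(n) for n in names}
--
--     found = set()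
--     for column in columns:
--         cl = column.lower()
--         parts = set(cl.split('_'))
--         subs = {cl[i:i + l] for l in lengths for i in range(len(cl) - l + 1)}
--         found.update(n for n in names
--                      if n in subs or n in parts or n + 's' in parts)
--     return found
-- ===== Notes on version B (the rewrite author's own statement) =====
-- stated objective: alternative
-- what changed: Instead of A's per-name scans of each column (substring test per (column, concept) plus a nested loop over the column's '_'-parts with equality and plural checks), B indexes each column once - the set of its substrings of exactly the name lengths that occur, and the set of its '_'-parts - and then keeps the names by set-membership lookups.
import Mathlib
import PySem

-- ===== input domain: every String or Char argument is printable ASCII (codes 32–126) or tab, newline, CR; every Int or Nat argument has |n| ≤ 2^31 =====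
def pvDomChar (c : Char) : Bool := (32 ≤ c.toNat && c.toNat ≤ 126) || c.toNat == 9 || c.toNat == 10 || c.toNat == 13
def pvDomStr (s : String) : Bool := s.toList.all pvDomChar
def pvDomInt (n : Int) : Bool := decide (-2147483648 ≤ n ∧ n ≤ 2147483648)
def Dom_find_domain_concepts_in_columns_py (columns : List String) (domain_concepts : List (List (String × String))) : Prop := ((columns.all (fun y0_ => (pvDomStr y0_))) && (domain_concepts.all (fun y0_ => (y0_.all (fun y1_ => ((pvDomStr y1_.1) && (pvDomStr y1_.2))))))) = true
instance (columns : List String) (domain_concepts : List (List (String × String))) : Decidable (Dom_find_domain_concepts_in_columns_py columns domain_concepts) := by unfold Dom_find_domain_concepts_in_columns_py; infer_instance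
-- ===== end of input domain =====

-- B replaces A's per-name scan of each column by a per-column index (the set of the
-- column's substrings of the needed lengths plus the set of its '_'-parts); same results,
-- alternative structure (no speed claim).

-- ===== PORT A =====
-- shared by both ports: both Pythons build the same name list with the same comprehension
def pvConceptNames (domain_concepts : List (List (String × String))) : List String :=
  (domain_concepts.filter (fun c => PySem.Dict.getD (PySem.Dict.mk c) "name" "" != "")).map
    (fun c => PySem.Str.lower (PySem.Dict.getD (PySem.Dict.mk c) "name" ""))

def find_domain_concepts_in_columns_py (columns : List String) (domain_concepts : List (List (String × String))) : List String :=
  let concept_names := pvConceptNames domain_concepts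
  columns.foldl (fun found column =>
    let column_lower := PySem.Str.lower column
    -- '_' is non-empty, so split? is never none; .getD [] is pure totalization
    let column_parts := (PySem.Str.split? column_lower "_").getD []
    concept_names.foldl (fun found concept_name =>
      let found1 := if PySem.Str.isIn concept_name column_lower then PySem.Set.add found concept_name else found
      column_parts.foldl (fun found part =>
        if part == concept_name || part == concept_name ++ "s" then PySem.Set.add found concept_name else found)
        found1)
      found)
    PySem.Set.empty

-- ===== PORT B =====
def find_domain_concepts_in_columns_py_alt (columns : List String) (domain_concepts : List (List (String × String))) : List String :=
  let names := pvConceptNames domain_concepts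
  let lengths : PySem.Set Int := PySem.Set.ofList (names.map PySem.Str.len)
  columns.foldl (fun found column =>
    let cl := PySem.Str.lower column
    let parts : PySem.Set String := PySem.Set.ofList ((PySem.Str.split? cl "_").getD [])
    let subs : PySem.Set String := PySem.Set.ofList (lengths.flatMap (fun l =>
      (PySem.List.pyRange 0 (PySem.Str.len cl - l + 1)).map (fun i =>
        PySem.Str.slice cl (some i) (some (i + l)))))
    PySem.Set.update found (names.filter (fun n =>
      PySem.Set.contains subs n || PySem.Set.contains parts n ||
      PySem.Set.contains parts (n ++ "s"))))
    PySem.Set.empty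

-- ===== PRECONDITION & SPEC =====
def Spec_find_domain_concepts_in_columns_py (columns : List String) (domain_concepts : List (List (String × String))) (out : List String) : Prop := out = find_domain_concepts_in_columns_py_alt columns domain_concepts
instance (columns : List String) (domain_concepts : List (List (String × String))) (out : List String) : Decidable (Spec_find_domain_concepts_in_columns_py columns domain_concepts out) := by unfold Spec_find_domain_concepts_in_columns_py; infer_instance

-- ===== CLAIM (what is proved, stated in full; the proofs are below) =====
def Claim_equal_find_domain_concepts_in_columns_py : Prop := ∀ (columns : List String) (domain_concepts : List (List (String × String))), Dom_find_domain_concepts_in_columns_py columns domain_concepts → Spec_find_domain_concepts_in_columns_py columns domain_concepts (find_domain_concepts_in_columns_py columns domain_concepts)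

-- ===== LEMMAS AND PROOFS =====

-- A's inner loop over the column parts collapses to one conditional add
lemma pv_fold_parts (parts : List String) (n : String) (s : PySem.Set String) :
    parts.foldl (fun s p => if p == n || p == n ++ "s" then PySem.Set.add s n else s) s
    = if parts.any (fun p => p == n || p == n ++ "s") then PySem.Set.add s n else s := by
  induction parts generalizing s with
  | nil => simp
  | cons q qs ih =>
    simp only [List.foldl_cons, List.any_cons]
    rw [ih]
    by_cases h : (q == n || q == n ++ "s") = true <;>
      by_cases h2 : (qs.any fun p => p == n || p == n ++ "s") = true <;>
        simp [h, h2, PySem.Set.add_of_mem, PySem.Set.mem_add]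

-- A's whole per-name step is one conditional add
lemma pv_step (parts : List String) (cl n : String) (s : PySem.Set String) :
    parts.foldl (fun s p => if p == n || p == n ++ "s" then PySem.Set.add s n else s)
      (if PySem.Str.isIn n cl then PySem.Set.add s n else s)
    = if (PySem.Str.isIn n cl || parts.any (fun p => p == n || p == n ++ "s")) then PySem.Set.add s n else s := by
  rw [pv_fold_parts]
  cases PySem.Str.isIn n cl <;>
    cases parts.any (fun p => p == n || p == n ++ "s") <;> simp

-- membership in B's substring index = Python's 'n in cl', for any n whose length is indexed
lemma pv_mem_subs (cl : String) (L : List Int) (n : String)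
    (hL : ∀ l ∈ L, 0 ≤ l) (hn : PySem.Str.len n ∈ L) :
    (n ∈ L.flatMap (fun l => (PySem.List.pyRange 0 (PySem.Str.len cl - l + 1)).map
        (fun i => PySem.Str.slice cl (some i) (some (i + l))))) ↔ PySem.Str.isIn n cl = true := by
  rw [PySem.Str.isIn_iff_infix]
  constructor
  · intro h
    simp only [List.mem_flatMap, List.mem_map] at h
    obtain ⟨l, hlL, i, hi, rfl⟩ := h
    rw [PySem.List.mem_pyRange_one] at hi
    have h0l := hL l hlL
    have hsl : (PySem.Str.slice cl (some i) (some (i + l))).toList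
        = List.take ((i + l).toNat - i.toNat) (List.drop i.toNat cl.toList) := by
      rw [PySem.Str.toList_slice, PySem.Chars.slice_eq_listSlice,
        PySem.List.slice_toNat _ hi.1 (by omega)]
    rw [hsl]
    exact ((List.take_prefix _ _).isInfix).trans ((List.drop_suffix _ _).isInfix)
  · rintro ⟨pre, suf, hps⟩
    have hlen : cl.toList.length = pre.length + n.toList.length + suf.length := by
      rw [← hps]; simp [List.length_append]; omega
    refine List.mem_flatMap.mpr ⟨PySem.Str.len n, hn,
      List.mem_map.mpr ⟨(pre.length : Int), ?_, ?_⟩⟩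
    · rw [PySem.List.mem_pyRange_one]
      rw [PySem.Str.len_eq n, PySem.Str.len_eq cl]
      constructor
      · positivity
      · omega
    · apply String.toList_inj.mp
      rw [PySem.Str.toList_slice, PySem.Chars.slice_eq_listSlice, PySem.Str.len_eq,
        PySem.List.slice_natCast_add, ← hps]
      rw [List.append_assoc, List.drop_left, List.take_left]

-- B's per-name test equals A's per-name condition (for names in the indexed list)
lemma pv_cond (names parts : List String) (cl n : String) (hn : n ∈ names) :
    (PySem.Set.contains (PySem.Set.ofList ((PySem.Set.ofList (names.map PySem.Str.len)).flatMap (fun l =>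
        (PySem.List.pyRange 0 (PySem.Str.len cl - l + 1)).map (fun i =>
          PySem.Str.slice cl (some i) (some (i + l)))))) n
      || PySem.Set.contains (PySem.Set.ofList parts) n
      || PySem.Set.contains (PySem.Set.ofList parts) (n ++ "s"))
    = (PySem.Str.isIn n cl || parts.any (fun p => p == n || p == n ++ "s")) := by
  have hL : ∀ l ∈ PySem.Set.ofList (names.map PySem.Str.len), 0 ≤ l := by
    intro l hl
    rw [PySem.Set.mem_ofList, List.mem_map] at hl
    obtain ⟨m, _, rfl⟩ := hl
    rw [PySem.Str.len_eq]
    positivity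
  have hn' : PySem.Str.len n ∈ PySem.Set.ofList (names.map PySem.Str.len) :=
    (PySem.Set.mem_ofList _ _).mpr (List.mem_map_of_mem hn)
  have hex : (∃ p ∈ parts, p = n ∨ p = n ++ "s") ↔ (n ∈ parts ∨ n ++ "s" ∈ parts) := by
    constructor
    · rintro ⟨p, hp, rfl | rfl⟩
      · exact Or.inl hp
      · exact Or.inr hp
    · rintro (h | h)
      · exact ⟨_, h, Or.inl rfl⟩
      · exact ⟨_, h, Or.inr rfl⟩
  apply Bool.eq_iff_iff.mpr
  simp only [Bool.or_eq_true, PySem.Set.contains_iff, PySem.Set.mem_ofList,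
    List.any_eq_true, beq_iff_eq]
  rw [pv_mem_subs cl _ n hL hn', hex]
  tauto

-- a fold of conditional adds is an update with the filtered list
lemma pv_fold_update {α : Type} [BEq α] [LawfulBEq α] (l : List α)
    (f : PySem.Set α → α → PySem.Set α) (p : α → Bool) (s : PySem.Set α)
    (H : ∀ (s : PySem.Set α), ∀ x ∈ l, f s x = if p x then PySem.Set.add s x else s) :
    l.foldl f s = PySem.Set.update s (l.filter p) := by
  induction l generalizing s with
  | nil => simp [PySem.Set.update_nil]
  | cons x xs ih =>
    simp only [List.foldl_cons, List.filter_cons]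
    rw [H s x (by simp)]
    by_cases hp : p x = true
    · rw [if_pos hp, hp]
      simp only [if_true]
      rw [PySem.Set.update_cons, ih _ (fun s y hy => H s y (by simp [hy]))]
    · rw [if_neg hp]
      simp only [hp, Bool.false_eq_true, if_false]
      exact ih _ (fun s y hy => H s y (by simp [hy]))

-- per column, A's nested loops equal B's filtered update
lemma pv_col (names : List String) (cl : String) (parts : List String) (found : PySem.Set String) :
    names.foldl (fun found n =>
      parts.foldl (fun found p => if p == n || p == n ++ "s" then PySem.Set.add found n else found)
        (if PySem.Str.isIn n cl then PySem.Set.add found n else found)) found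
    = PySem.Set.update found (names.filter (fun n =>
        PySem.Set.contains (PySem.Set.ofList ((PySem.Set.ofList (names.map PySem.Str.len)).flatMap (fun l =>
          (PySem.List.pyRange 0 (PySem.Str.len cl - l + 1)).map (fun i =>
            PySem.Str.slice cl (some i) (some (i + l)))))) n
        || PySem.Set.contains (PySem.Set.ofList parts) n
        || PySem.Set.contains (PySem.Set.ofList parts) (n ++ "s"))) := by
  apply pv_fold_update
  intro s n hn
  rw [pv_step, pv_cond names parts cl n hn]

-- ===== VERDICT (by name: the statement is the Claim_ definition above) =====
theorem find_domain_concepts_in_columns_py_spec : Claim_equal_find_domain_concepts_in_columns_py := by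
  intro columns domain_concepts _
  unfold Spec_find_domain_concepts_in_columns_py
  unfold find_domain_concepts_in_columns_py find_domain_concepts_in_columns_py_alt
  apply PySem.List.foldl_congr_mem
  intro acc col _
  exact pv_col (pvConceptNames domain_concepts) (PySem.Str.lower col)
    ((PySem.Str.split? (PySem.Str.lower col) "_").getD []) acc
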